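-- pv_equiv track=rewrite | github.com/tomneuhaeuser/FinNum | Dataset.py | __find_positions__
-- ===== SOURCE A (Python) =====
-- def __find_positions__(lemma, target_num):
--     positions = []
--
--     for tn in target_num:
--         positions.extend([i for i in range(len(lemma)) if lemma[i] == tn])
--
--     positions = list(set(positions))
--     positions.sort()
--
--     assert len(target_num) == len(positions)
--     return positions
-- ===== SOURCE B (Python) =====
-- def __find_positions__(lemma, target_num):
--     tset = set(target_num)
--     positions = [i for i, v in enumerate(lemma) if v in tset]
--     assert len(target_num) == len(positions)
--     return positions
-- ===== Notes on version B (the rewrite author's own statement) =====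
-- stated objective: simpler
-- what changed: Replaces the nested loop (a full scan of lemma per target number, then set-dedup and sort) by a single enumerate pass over lemma collecting indices whose value lies in a set built once from target_num; the result is already sorted and duplicate-free, so the dedup and sort steps disappear.
import Mathlib
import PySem

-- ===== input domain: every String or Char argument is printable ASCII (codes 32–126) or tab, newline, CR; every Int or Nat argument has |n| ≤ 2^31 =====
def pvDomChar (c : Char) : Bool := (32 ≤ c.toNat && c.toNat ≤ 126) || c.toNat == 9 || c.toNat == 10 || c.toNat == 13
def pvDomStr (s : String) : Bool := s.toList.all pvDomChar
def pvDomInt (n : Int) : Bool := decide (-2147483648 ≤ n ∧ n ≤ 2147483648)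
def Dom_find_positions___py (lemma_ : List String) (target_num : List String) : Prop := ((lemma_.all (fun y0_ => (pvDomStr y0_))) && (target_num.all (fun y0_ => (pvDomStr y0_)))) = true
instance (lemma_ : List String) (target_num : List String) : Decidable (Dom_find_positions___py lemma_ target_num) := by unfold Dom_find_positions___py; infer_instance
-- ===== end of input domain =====

-- B replaces A's per-target scans + set-dedup + sort by one enumerate pass over lemma_ with a
-- set built once from target_num (objective: simpler; the assert is kept, excluded via Pre_).

-- ===== PORT A =====
-- for tn in target_num: positions.extend([i for i in range(len(lemma)) if lemma[i] == tn]);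
-- positions = list(set(positions)); positions.sort()   (sorted list of a set of ints)
def find_positions___py (lemma_ : List String) (target_num : List String) : List Int :=
  let positions : List Int :=
    target_num.foldl
      (fun acc tn =>
        acc ++ (PySem.List.pyRange 0 lemma_.length 1).filter
          (fun i => PySem.List.pyGetD lemma_ i "" == tn)) []
  PySem.List.sorted (PySem.Set.ofList positions) (fun x => x) false

-- ===== PORT B =====
-- tset = set(target_num); positions = [i for i, v in enumerate(lemma) if v in tset]
def find_positions___py_alt (lemma_ : List String) (target_num : List String) : List Int :=
  let tset : PySem.Set String := PySem.Set.ofList target_num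
  ((PySem.List.enumerate lemma_ 0).filter (fun p => PySem.Set.contains tset p.2)).map (·.1)

-- ===== PRECONDITION & SPEC =====
-- Pre_ excludes exactly the inputs where the assert fails (AssertionError in both A and B):
-- the number of positions in lemma_ holding a target value must equal len(target_num).
def Pre_find_positions___py (lemma_ : List String) (target_num : List String) : Prop :=
  lemma_.countP (fun s => decide (s ∈ target_num)) = target_num.length
instance (lemma_ : List String) (target_num : List String) : Decidable (Pre_find_positions___py lemma_ target_num) := by unfold Pre_find_positions___py; infer_instance

def pvWitness_find_positions___py : List String × List String := (["12", "a", "7"], ["7", "12"])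

def Spec_find_positions___py (lemma_ : List String) (target_num : List String) (out : List Int) : Prop := out = find_positions___py_alt lemma_ target_num
instance (lemma_ : List String) (target_num : List String) (out : List Int) : Decidable (Spec_find_positions___py lemma_ target_num out) := by unfold Spec_find_positions___py; infer_instance

-- ===== CLAIM (what is proved, stated in full; the proofs are below) =====
def Claim_equal_find_positions___py : Prop := ∀ (lemma_ : List String) (target_num : List String), Dom_find_positions___py lemma_ target_num → Pre_find_positions___py lemma_ target_num → Spec_find_positions___py lemma_ target_num (find_positions___py lemma_ target_num)

-- ===== LEMMAS AND PROOFS =====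

-- B's result, rewritten over pyRange: the indices of lemma_ whose entry is in target_num.
lemma alt_eq_filter_range (lemma_ target_num : List String) :
    find_positions___py_alt lemma_ target_num =
      (PySem.List.pyRange 0 lemma_.length 1).filter
        (fun i => decide (PySem.List.pyGetD lemma_ i "" ∈ target_num)) := by
  unfold find_positions___py_alt
  rw [PySem.List.enumerate_eq_map_pyRange lemma_ ""]
  simp [List.filter_map, List.map_map, Function.comp_def, PySem.Set.mem_ofList]

lemma key_equiv (lemma_ target_num : List String) :
    find_positions___py lemma_ target_num = find_positions___py_alt lemma_ target_num := by
  rw [alt_eq_filter_range]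
  unfold find_positions___py
  apply PySem.List.sorted_eq_of_perm_of_pairwise_lt
  · -- same members, both nodup
    rw [List.perm_ext_iff_of_nodup]
    · intro x
      rw [PySem.List.foldl_append_eq_flatMap]
      simp [PySem.Set.mem_ofList, List.mem_flatMap, List.mem_filter]
      tauto
    · exact (((PySem.List.pairwise_lt_pyRange_one 0 lemma_.length).filter _).imp Int.ne_of_lt)
    · exact PySem.Set.nodup_ofList _
  · exact (PySem.List.pairwise_lt_pyRange_one 0 lemma_.length).filter _

-- ===== VERDICT (by name: the statement is the Claim_ definition above) =====
theorem find_positions___py_spec : Claim_equal_find_positions___py := by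
  intro lemma_ target_num _ _
  exact key_equiv lemma_ target_num
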